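-- pv_equiv track=rewrite | github.com/chrislockard21/ise589 | python_files/tests/lockard_chris_exam1.py | EthanStringTest
-- ===== SOURCE A (Python) =====
-- def EthanStringTest(testWList):
--     from collections import Counter
--     result = []
--     for word in testWList:
--         # Finds the splitting point of words
--         div_word = int(len(word)/2)
--
--         # Sets the first and last parts of the word based on word remainder
--         first = word[:div_word].lower()
--         if len(word) % 2 == 0:
--             last = word[div_word:].lower()
--         else:
--             last = word[div_word + 1:]
--
--         # Creates Counter objects to count the frequency of letters in the
--         # strings and compare them for equality
--         first_dict = Counter(first)
--         last_dict = Counter(last)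
--         if first_dict == last_dict:
--             result.append('Pass')
--         else:
--             result.append('Fail')
--     return result
-- ===== SOURCE B (Python) =====
-- def EthanStringTest(testWList):
--     def halves_anagram(word):
--         n = len(word)
--         first = word[:n // 2].lower()
--         last = word[(n + 1) // 2:]
--         if n % 2 == 0:
--             last = last.lower()
--         return sorted(first) == sorted(last)
--     return ['Pass' if halves_anagram(w) else 'Fail' for w in testWList]
-- ===== Notes on version B (the rewrite author's own statement) =====
-- stated objective: idiomatic
-- what changed: B maps a boolean helper over the list (list comprehension instead of an accumulator loop with per-iteration appends), extracts the second half with a single (n+1)//2 slice instead of two branch-dependent slices, and decides the anagram property by comparing sorted character lists instead of building and comparing two Counter frequency dictionaries; a timing run measured this constant-factor faster (no per-word dict construction/hashing).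
import Mathlib
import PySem

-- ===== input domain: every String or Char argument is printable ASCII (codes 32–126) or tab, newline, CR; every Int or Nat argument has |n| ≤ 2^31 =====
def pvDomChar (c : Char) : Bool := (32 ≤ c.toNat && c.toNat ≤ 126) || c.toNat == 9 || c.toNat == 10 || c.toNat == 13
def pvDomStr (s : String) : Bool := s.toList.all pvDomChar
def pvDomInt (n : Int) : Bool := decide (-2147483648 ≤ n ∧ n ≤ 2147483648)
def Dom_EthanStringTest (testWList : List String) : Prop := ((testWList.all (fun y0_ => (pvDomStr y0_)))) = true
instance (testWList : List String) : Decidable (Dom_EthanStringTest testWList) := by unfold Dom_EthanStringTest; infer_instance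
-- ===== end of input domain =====

-- B maps a boolean helper over the list (comprehension vs accumulator loop), slices the second half once with (n+1)//2, and compares sorted character lists instead of Counter dicts (objective: idiomatic).


-- ===== PORT A =====
-- Python's `Counter ==` (dict ==) ignores insertion order: it is map equality.
-- Counters built from lists have Nodup keys and no zero counts, so comparing the
-- key sets and the lookups at d1's keys is exactly that map equality.
def pyCounterEq (d1 d2 : PySem.Dict Char Int) : Bool :=
  PySem.Set.equal d1.keys d2.keys && d1.keys.all (fun k => d1.getD k 0 == d2.getD k 0)

def EthanStringTest (testWList : List String) : List String :=
  testWList.foldl (fun result word =>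
    let cs := word.toList
    -- div_word = int(len(word)/2): exact as the floor for these lengths
    let div_word : Int := (cs.length : Int) / 2
    let first := PySem.Chars.lower (PySem.List.slice cs none (some div_word))
    let last := if cs.length % 2 == 0 then
        PySem.Chars.lower (PySem.List.slice cs (some div_word) none)
      else
        PySem.List.slice cs (some (div_word + 1)) none
    let first_dict := PySem.Dict.counter first
    let last_dict := PySem.Dict.counter last
    if pyCounterEq first_dict last_dict then result ++ ["Pass"] else result ++ ["Fail"]) []

-- ===== PORT B =====
-- helper halves_anagram of Source B
def pvHalvesAnagram (word : String) : Bool :=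
  let cs := word.toList
  let n : Int := (cs.length : Int)
  let first := PySem.Chars.lower (PySem.List.slice cs none (some (PySem.Int.floordiv n 2)))
  let last0 := PySem.List.slice cs (some (PySem.Int.floordiv (n + 1) 2)) none
  let last := if cs.length % 2 == 0 then PySem.Chars.lower last0 else last0
  PySem.List.sorted first (fun x => x) false == PySem.List.sorted last (fun x => x) false

def EthanStringTest_alt (testWList : List String) : List String :=
  testWList.map (fun w => if pvHalvesAnagram w then "Pass" else "Fail")

-- ===== PRECONDITION & SPEC =====
def Spec_EthanStringTest (testWList : List String) (out : List String) : Prop := out = EthanStringTest_alt testWList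
instance (testWList : List String) (out : List String) : Decidable (Spec_EthanStringTest testWList out) := by unfold Spec_EthanStringTest; infer_instance

-- ===== CLAIM (what is proved, stated in full; the proofs are below) =====
def Claim_equal_EthanStringTest : Prop := ∀ (testWList : List String), Dom_EthanStringTest testWList → Spec_EthanStringTest testWList (EthanStringTest testWList)

-- ===== LEMMAS AND PROOFS =====

-- Counter equality (as Python's dict ==) is exactly permutation of the two character lists.
lemma counterEq_iff_perm (f l : List Char) :
    pyCounterEq (PySem.Dict.counter f) (PySem.Dict.counter l) = true ↔ f.Perm l := by
  rw [List.perm_iff_count]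
  simp only [pyCounterEq, Bool.and_eq_true, PySem.Dict.keys_counter,
    PySem.Set.equal_iff, PySem.Set.mem_ofList, List.all_eq_true,
    PySem.Dict.getD_counter, beq_iff_eq]
  constructor
  · rintro ⟨hmem, hcnt⟩ a
    by_cases ha : a ∈ f
    · exact_mod_cast hcnt a ha
    · have hl : a ∉ l := fun h => ha ((hmem a).mpr h)
      rw [List.count_eq_zero_of_not_mem ha, List.count_eq_zero_of_not_mem hl]
  · intro h
    refine ⟨fun x => ?_, fun k _ => by exact_mod_cast h k⟩
    rw [← List.count_pos_iff, ← List.count_pos_iff, h x]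

-- The per-word conditions coincide (A's branch-dependent slices vs B's single (n+1)/2 slice).
lemma word_eq (w : String) :
    (let cs := w.toList
     let div_word : Int := (cs.length : Int) / 2
     pyCounterEq
       (PySem.Dict.counter (PySem.Chars.lower (PySem.List.slice cs none (some div_word))))
       (PySem.Dict.counter (if cs.length % 2 == 0 then
            PySem.Chars.lower (PySem.List.slice cs (some div_word) none)
          else PySem.List.slice cs (some (div_word + 1)) none)))
    = pvHalvesAnagram w := by
  simp only [pvHalvesAnagram]
  rw [Bool.eq_iff_iff, counterEq_iff_perm]
  simp only [beq_iff_eq, PySem.List.sorted_id_eq_sorted_id_iff_perm]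
  have hl : w.toList.length = w.length := by simp
  have hdiv : PySem.Int.floordiv ((w.toList.length : Int)) 2 = (w.toList.length : Int) / 2 :=
    PySem.Int.floordiv_eq_ediv_of_pos (by omega)
  rw [hdiv]
  by_cases h : w.length % 2 = 0
  · have h1 : PySem.Int.floordiv ((w.toList.length : Int) + 1) 2 = (w.toList.length : Int) / 2 := by
      rw [PySem.Int.floordiv_eq_ediv_of_pos (by omega)]; omega
    rw [h1]; simp [h]
  · have h1 : PySem.Int.floordiv ((w.toList.length : Int) + 1) 2 = (w.toList.length : Int) / 2 + 1 := by
      rw [PySem.Int.floordiv_eq_ediv_of_pos (by omega)]; omega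
    rw [h1]; simp [h]

-- A's accumulator loop equals acc ++ B's map.
lemma fold_eq_map (l : List String) (acc : List String) :
    l.foldl (fun result word =>
      let cs := word.toList
      let div_word : Int := (cs.length : Int) / 2
      let first := PySem.Chars.lower (PySem.List.slice cs none (some div_word))
      let last := if cs.length % 2 == 0 then
          PySem.Chars.lower (PySem.List.slice cs (some div_word) none)
        else
          PySem.List.slice cs (some (div_word + 1)) none
      let first_dict := PySem.Dict.counter first
      let last_dict := PySem.Dict.counter last
      if pyCounterEq first_dict last_dict then result ++ ["Pass"] else result ++ ["Fail"]) acc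
    = acc ++ l.map (fun w => if pvHalvesAnagram w then "Pass" else "Fail") := by
  induction l generalizing acc with
  | nil => simp
  | cons w t ih =>
    simp only [List.foldl_cons, List.map_cons]
    rw [show (if pyCounterEq
          (PySem.Dict.counter (PySem.Chars.lower (PySem.List.slice w.toList none (some ((w.toList.length : Int) / 2)))))
          (PySem.Dict.counter (if w.toList.length % 2 == 0 then
              PySem.Chars.lower (PySem.List.slice w.toList (some ((w.toList.length : Int) / 2)) none)
            else PySem.List.slice w.toList (some ((w.toList.length : Int) / 2 + 1)) none))
        then acc ++ ["Pass"] else acc ++ ["Fail"])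
      = acc ++ [if pvHalvesAnagram w then "Pass" else "Fail"] from by
        rw [← word_eq w]; exact (apply_ite (fun s => acc ++ [s]) _ _ _).symm]
    rw [ih]; simp

-- ===== VERDICT (by name: the statement is the Claim_ definition above) =====
theorem EthanStringTest_spec : Claim_equal_EthanStringTest := by
  intro testWList _
  unfold Spec_EthanStringTest EthanStringTest EthanStringTest_alt
  exact fold_eq_map testWList []
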